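-- pv_equiv track=rewrite | github.com/arey-dev/bookbot | stats.py | get_chars_count
-- ===== SOURCE A (Python) =====
-- def get_chars_count(string):
--     character_dict = {}
--
--     for word in string.split():
--         for char in word.lower():
--             if char in character_dict:
--                 character_dict[char] += 1
--             else:
--                 character_dict[char] = 1
--
--     return character_dict
-- ===== SOURCE B (Python) =====
-- def get_chars_count(string):
--     cleaned = "".join(string.split()).lower()
--     return {c: cleaned.count(c) for c in dict.fromkeys(cleaned)}
-- ===== Notes on version B (the rewrite author's own statement) =====
-- stated objective: alternative
-- what changed: B flattens the non-whitespace characters into one lowered string, then builds the result as a per-distinct-character count (dict.fromkeys for first-occurrence order, str.count per key) instead of A's single incremental-accumulator pass over nested word/char loops.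
import Mathlib
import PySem

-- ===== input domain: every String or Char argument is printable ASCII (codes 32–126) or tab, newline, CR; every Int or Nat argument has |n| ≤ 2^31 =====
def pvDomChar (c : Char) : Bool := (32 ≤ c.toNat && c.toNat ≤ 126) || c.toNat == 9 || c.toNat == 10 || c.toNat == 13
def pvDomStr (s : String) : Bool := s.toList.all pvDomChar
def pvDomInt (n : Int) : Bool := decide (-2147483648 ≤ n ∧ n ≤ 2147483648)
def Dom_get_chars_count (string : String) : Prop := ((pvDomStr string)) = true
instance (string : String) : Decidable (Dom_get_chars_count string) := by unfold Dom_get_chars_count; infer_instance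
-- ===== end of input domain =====

-- B counts the flattened, lowered non-whitespace characters per distinct character
-- (dict.fromkeys order + str.count) instead of A's incremental nested word/char accumulator loop; alternative decomposition, same results.

-- ===== PORT A =====
def get_chars_count (string : String) : List (String × Int) :=
  ((PySem.Str.split₀ string).foldl (fun d word =>
      (PySem.Str.lower word).toList.foldl (fun d ch =>
          if d.contains (String.ofList [ch])
          then d.insert (String.ofList [ch]) (d.getD (String.ofList [ch]) 0 + 1)
          else d.insert (String.ofList [ch]) 1) d)
    PySem.Dict.empty).items

-- ===== PORT B =====
-- the dict comprehension {c: cleaned.count(c) for c in dict.fromkeys(cleaned)}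
def pvCounts (cleaned : List Char) : List (String × Int) :=
  (PySem.List.dedup cleaned).map (fun c => (String.ofList [c], (cleaned.count c : Int)))

def get_chars_count_alt (string : String) : List (String × Int) :=
  pvCounts ((PySem.Str.lower (PySem.Str.join "" (PySem.Str.split₀ string))).toList)

-- ===== PRECONDITION & SPEC =====
def Spec_get_chars_count (string : String) (out : List (String × Int)) : Prop := out = get_chars_count_alt string
instance (string : String) (out : List (String × Int)) : Decidable (Spec_get_chars_count string out) := by unfold Spec_get_chars_count; infer_instance

-- ===== CLAIM (what is proved, stated in full; the proofs are below) =====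
def Claim_equal_get_chars_count : Prop := ∀ (string : String), Dom_get_chars_count string → Spec_get_chars_count string (get_chars_count string)

-- ===== LEMMAS AND PROOFS =====

-- the char → 1-character-string key map is injective
theorem pvKeyInj : Function.Injective (fun c : Char => String.ofList [c]) := by
  intro a b h
  simpa using congrArg String.toList h

-- joining with the empty separator is flattening
theorem pvJoinNil (parts : List (List Char)) : PySem.Chars.join [] parts = parts.flatten := by
  induction parts with
  | nil => rfl
  | cons p t ih =>
    cases t with
    | nil => simp [PySem.Chars.join, List.intercalate]
    | cons q u => simpa [PySem.Chars.join_cons_cons] using ih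

-- B's lowered join of the words is the flattened list of lowered word characters
theorem pvLowerJoin (words : List String) :
    (PySem.Str.lower (PySem.Str.join "" words)).toList
      = (words.map (fun w => (PySem.Str.lower w).toList)).flatten := by
  simp only [PySem.Str.toList_lower, PySem.Str.toList_join]
  rw [show ("" : String).toList = ([] : List Char) from rfl, pvJoinNil]
  show List.map PySem.Chars.lowerChar (List.map String.toList words).flatten = _
  rw [List.map_flatten, List.map_map]
  refine congrArg List.flatten (List.map_congr_left (fun w _ => ?_))
  simp only [Function.comp_apply]
  rfl

-- ordered dedup commutes with an injective map
theorem pvDedupMap {α β : Type} [DecidableEq α] [DecidableEq β] (f : α → β)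
    (hf : Function.Injective f) (l : List α) :
    PySem.List.dedup (l.map f) = (PySem.List.dedup l).map f := by
  have key : ∀ (l : List α) (acc : List α),
      List.foldl PySem.Set.add (acc.map f) (l.map f) = (List.foldl PySem.Set.add acc l).map f := by
    intro l
    induction l with
    | nil => intro acc; rfl
    | cons x t ih =>
      intro acc
      have hc : PySem.Set.contains (acc.map f) (f x) = PySem.Set.contains acc x := by
        simp [PySem.Set.contains, List.mem_map, hf.eq_iff]
      by_cases h : PySem.Set.contains acc x = true
      · simp only [List.map_cons, List.foldl_cons, PySem.Set.add, hc, h, if_true]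
        exact ih acc
      · have h' : PySem.Set.contains acc x = false := by simpa using h
        simp only [List.map_cons, List.foldl_cons, PySem.Set.add, hc, h', Bool.false_eq_true,
          if_false]
        simpa only [List.map_append, List.map_cons, List.map_nil] using ih (acc ++ [x])
  simpa [PySem.List.dedup_eq_ofList, PySem.Set.ofList_eq_foldl] using key l []

-- A's per-character update is the counter update, whether or not the key is present
theorem pvStepEq (d : PySem.Dict String Int) (k : String) :
    (if d.contains k then d.insert k (d.getD k 0 + 1) else d.insert k 1)
      = d.insert k (d.getD k 0 + 1) := by
  by_cases h : d.contains k = true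
  · simp [h]
  · have h' : d.contains k = false := by simpa using h
    simp [h', PySem.Dict.getD_of_not_contains d 0 h']

-- A's nested word/char accumulator loop produces exactly B's per-distinct-character counts
theorem pvAeq (words : List String) :
    ((words.foldl (fun d word =>
        (PySem.Str.lower word).toList.foldl (fun d ch =>
            if d.contains (String.ofList [ch])
            then d.insert (String.ofList [ch]) (d.getD (String.ofList [ch]) 0 + 1)
            else d.insert (String.ofList [ch]) 1) d)
      PySem.Dict.empty).items)
      = pvCounts ((words.map (fun w => (PySem.Str.lower w).toList)).flatten) := by
  have h1 : ∀ (d : PySem.Dict String Int),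
      (words.foldl (fun d word =>
        (PySem.Str.lower word).toList.foldl (fun d ch =>
            if d.contains (String.ofList [ch])
            then d.insert (String.ofList [ch]) (d.getD (String.ofList [ch]) 0 + 1)
            else d.insert (String.ofList [ch]) 1) d) d)
      = ((words.map (fun w => (PySem.Str.lower w).toList)).flatten.map
          (fun c => String.ofList [c])).foldl (fun d k => d.insert k (d.getD k 0 + 1)) d := by
    intro d
    rw [List.foldl_map, List.foldl_flatten, List.foldl_map]
    refine PySem.List.foldl_congr_mem _ _ _ _ (fun acc w _ => ?_)
    refine PySem.List.foldl_congr_mem _ _ _ _ (fun acc' ch _ => ?_)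
    exact pvStepEq acc' (String.ofList [ch])
  rw [h1, PySem.Dict.foldl_insert_getD_add_one_eq_counter, PySem.Dict.items_counter, pvCounts]
  rw [show PySem.Set.ofList (((words.map (fun w => (PySem.Str.lower w).toList)).flatten).map
        (fun c => String.ofList [c]))
      = PySem.List.dedup (((words.map (fun w => (PySem.Str.lower w).toList)).flatten).map
        (fun c => String.ofList [c])) from by simp [PySem.List.dedup_eq_ofList]]
  rw [pvDedupMap _ pvKeyInj, List.map_map]
  refine List.map_congr_left (fun c _ => ?_)
  simp only [Function.comp_apply]
  rw [List.count_map_of_injective _ _ pvKeyInj]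

-- ===== VERDICT (by name: the statement is the Claim_ definition above) =====
theorem get_chars_count_spec : Claim_equal_get_chars_count := by
  intro string _
  unfold Spec_get_chars_count get_chars_count get_chars_count_alt
  rw [pvLowerJoin, pvAeq]
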